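-- pv_equiv track=rewrite | github.com/github-lily/AlgorithmSolve | 프로그래머스/0/120812. 최빈값 구하기/최빈값 구하기.py | solution
-- ===== SOURCE A (Python) =====
-- from collections import defaultdict
--
-- def solution(arr):
--
--     dic = defaultdict(int)
--
--     # 개수 카운트
--     for a in arr :
--         dic[a] += 1
--
--     # 최빈값 cnt 찾기
--     mx_cnt = max(dic.values())
--     # 최빈값
--     mx = 0
--     cnt = 0
--
--
--     # 최빈값 원소 찾기
--     for k,v in dic.items() :
--         if v == mx_cnt :
--             mx = k
--             cnt += 1
--             if cnt > 1 :
--                 return -1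
--     return mx
-- ===== SOURCE B (Python) =====
-- def solution(arr):
--     # sort, then scan runs of equal elements (no hash counting, no early-return scan)
--     s = sorted(arr)
--     groups = []
--     i = 0
--     n = len(s)
--     while i < n:
--         j = i
--         while j < n and s[j] == s[i]:
--             j += 1
--         groups.append((s[i], j - i))
--         i = j
--     mx = max(c for _, c in groups)   # ValueError on empty arr, like A's max over an empty dict
--     modes = [k for k, c in groups if c == mx]
--     return modes[0] if len(modes) == 1 else -1
-- ===== Notes on version B (the rewrite author's own statement) =====
-- stated objective: alternative
-- what changed: Replaces A's hash-map counting plus an early-return scan over dict items by sort-then-group run-length encoding of the sorted array, then selecting the keys whose run length equals the maximum.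
import Mathlib
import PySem

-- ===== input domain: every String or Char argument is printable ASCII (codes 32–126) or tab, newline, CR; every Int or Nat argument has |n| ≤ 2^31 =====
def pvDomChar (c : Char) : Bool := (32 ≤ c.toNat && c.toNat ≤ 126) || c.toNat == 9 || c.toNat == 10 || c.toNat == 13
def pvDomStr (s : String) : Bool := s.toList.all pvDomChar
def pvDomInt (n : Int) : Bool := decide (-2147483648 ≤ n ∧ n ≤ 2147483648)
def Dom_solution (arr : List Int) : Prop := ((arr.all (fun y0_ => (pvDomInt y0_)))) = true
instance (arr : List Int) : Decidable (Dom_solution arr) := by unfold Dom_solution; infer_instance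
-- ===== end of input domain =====

-- B replaces A's hash-map counting plus early-return item scan by sort-then-group run-length
-- encoding of the sorted array (objective: alternative).

-- ===== PORT A =====
-- the 'for k,v in dic.items()' loop with the in-loop early return (cnt > 1 → return -1)
def solutionLoopA (mxcnt : Int) : List (Int × Int) → Int → Int → Int
  | [], mx, _cnt => mx
  | (k, v) :: rest, mx, cnt =>
    if v == mxcnt then
      if cnt + 1 > 1 then -1 else solutionLoopA mxcnt rest k (cnt + 1)
    else solutionLoopA mxcnt rest mx cnt

def solution (arr : List Int) : Int :=
  let dic := arr.foldl (fun d a => d.modify a 0 (fun x => x + 1)) PySem.Dict.empty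
  match PySem.List.max? dic.values (fun v => v) with
  | none => 0  -- Python raises ValueError here (empty dict); excluded by Pre_solution
  | some mxcnt => solutionLoopA mxcnt dic.items 0 0

-- ===== PORT B =====
-- the outer 'while rest:' loop of Source B: consume one run (head element and its repeats) per step
def runsB : List Int → List (Int × Int)
  | [] => []
  | k :: t =>
    (k, 1 + ((t.takeWhile (fun x => x == k)).length : Int)) ::
      runsB (t.dropWhile (fun x => x == k))
termination_by s => s.length
decreasing_by
  simpa using Nat.lt_succ_of_le (List.length_dropWhile_le _ _)

def solution_alt (arr : List Int) : Int :=
  let groups := runsB (PySem.List.sorted arr (fun x => x) false)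
  match PySem.List.max? (groups.map (·.2)) (fun c => c) with
  | none => 0  -- Python raises ValueError here (empty arr); excluded by Pre_solution
  | some mx =>
    let modes := (groups.filter (fun p => p.2 == mx)).map (·.1)
    if modes.length == 1 then modes.headD (-1) else -1

-- ===== PRECONDITION & SPEC =====
-- Pre_ excludes only the empty list, on which both A and B raise ValueError (max of nothing).
def Pre_solution (arr : List Int) : Prop := arr ≠ []
instance (arr : List Int) : Decidable (Pre_solution arr) := by unfold Pre_solution; infer_instance

def pvWitness_solution : List Int := [1, 2, 2]

def Spec_solution (arr : List Int) (out : Int) : Prop := out = solution_alt arr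
instance (arr : List Int) (out : Int) : Decidable (Spec_solution arr out) := by unfold Spec_solution; infer_instance

-- ===== CLAIM (what is proved, stated in full; the proofs are below) =====
def Claim_equal_solution : Prop := ∀ (arr : List Int), Dom_solution arr → Pre_solution arr → Spec_solution arr (solution arr)

-- ===== LEMMAS AND PROOFS =====

-- A's dict items are the first-occurrence distinct elements paired with their counts
theorem itemsA_char (arr : List Int) :
    (arr.foldl (fun d a => d.modify a 0 (fun x => x + 1)) PySem.Dict.empty).items
      = (PySem.Set.ofList arr).map (fun k => (k, (arr.count k : Int))) := by
  rw [← PySem.Dict.counter_eq_foldl, PySem.Dict.items_counter]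

-- the first element surviving dropWhile fails the predicate
theorem pv_dropWhile_head_false {α : Type} {p : α → Bool} {t : List α} {b : α} {u : List α}
    (h : t.dropWhile p = b :: u) : p b = false := by
  induction t generalizing b u with
  | nil => simp [List.dropWhile] at h
  | cons x xs ih =>
    rw [List.dropWhile_cons] at h
    split at h
    · exact ih h
    · cases h
      simp_all

-- no occurrence of the head element survives dropWhile on a sorted tail
theorem not_mem_dropWhile_sorted (a : Int) (t : List Int) (ht : t.Pairwise (· ≤ ·))
    (hge : ∀ x ∈ t, a ≤ x) : a ∉ t.dropWhile (fun x => x == a) := by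
  intro hmem
  have hd : (t.dropWhile (fun x => x == a)).Pairwise (· ≤ ·) :=
    ht.sublist (List.dropWhile_sublist _)
  cases hdw : t.dropWhile (fun x => x == a) with
  | nil => simp [hdw] at hmem
  | cons b u =>
    have hba : b ≠ a := by simpa using pv_dropWhile_head_false hdw
    have hbt : b ∈ t := (List.dropWhile_sublist _).subset (by rw [hdw]; exact List.mem_cons_self)
    have hab : a ≤ b := hge b hbt
    rw [hdw] at hmem
    rcases List.mem_cons.mp hmem with h | h
    · exact hba h.symm
    · have hble : b ≤ a := (List.pairwise_cons.mp (hdw ▸ hd)).1 a h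
      exact hba (le_antisymm hble hab)

-- runsB of a sorted list: membership characterisation
theorem runsB_mem (s : List Int) (hs : s.Pairwise (· ≤ ·)) (k c : Int) :
    (k, c) ∈ runsB s ↔ k ∈ s ∧ c = (s.count k : Int) := by
  induction s using runsB.induct with
  | case1 => simp [runsB]
  | case2 a t ih =>
    have ht : t.Pairwise (· ≤ ·) := (List.pairwise_cons.mp hs).2
    have hge : ∀ x ∈ t, a ≤ x := (List.pairwise_cons.mp hs).1
    have hnotmem : a ∉ t.dropWhile (fun x => x == a) :=
      not_mem_dropWhile_sorted a t ht hge
    have hdsorted : (t.dropWhile (fun x => x == a)).Pairwise (· ≤ ·) :=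
      ht.sublist (List.dropWhile_sublist _)
    have htake : ∀ x ∈ t.takeWhile (fun x => x == a), x = a := by
      intro x hx; simpa using List.mem_takeWhile_imp hx
    have hsplit : t.takeWhile (fun x => x == a) ++ t.dropWhile (fun x => x == a) = t :=
      List.takeWhile_append_dropWhile
    have hcount_a : t.count a = (t.takeWhile (fun x => x == a)).length := by
      conv_lhs => rw [← hsplit]
      rw [List.count_append,
        List.count_eq_length.mpr (fun x hx => (htake x hx).symm),
        List.count_eq_zero.mpr hnotmem]
      omega
    have hcount_ne : ∀ k' : Int, k' ≠ a →
        t.count k' = (t.dropWhile (fun x => x == a)).count k' := by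
      intro k' hk'
      conv_lhs => rw [← hsplit]
      rw [List.count_append, List.count_eq_zero.mpr (fun hx => hk' (htake _ hx))]
      omega
    have hmem_ne : ∀ k' : Int, k' ≠ a →
        (k' ∈ t ↔ k' ∈ t.dropWhile (fun x => x == a)) := by
      intro k' hk'
      constructor
      · intro hk't
        rw [← hsplit] at hk't
        rcases List.mem_append.mp hk't with h | h
        · exact absurd (htake _ h) hk'
        · exact h
      · intro h; exact (List.dropWhile_sublist _).subset h
    rw [runsB]
    constructor
    · intro h
      rcases List.mem_cons.mp h with h | h
      · obtain ⟨hk, hc⟩ := Prod.mk.inj h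
        subst hk
        refine ⟨List.mem_cons_self, ?_⟩
        have hcc : (k :: t).count k = t.count k + 1 := by simp [List.count_cons]
        rw [hc, hcc, hcount_a]
        push_cast
        ring
      · obtain ⟨hkd, hc⟩ := (ih hdsorted).mp h
        have hkne : k ≠ a := fun he => hnotmem (he ▸ hkd)
        refine ⟨List.mem_cons_of_mem _ ((hmem_ne k hkne).mpr hkd), ?_⟩
        have hcc : (a :: t).count k = t.count k := by
          simp [Ne.symm hkne]
        rw [hc, hcc, hcount_ne k hkne]
    · rintro ⟨hk, hc⟩
      by_cases hka : k = a
      · subst hka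
        apply List.mem_cons.mpr
        left
        have hcc : (k :: t).count k = t.count k + 1 := by simp [List.count_cons]
        rw [hcc, hcount_a] at hc
        rw [Prod.mk.injEq]
        refine ⟨rfl, ?_⟩
        rw [hc]
        push_cast
        ring
      · apply List.mem_cons.mpr
        right
        rcases List.mem_cons.mp hk with h | h
        · exact absurd h hka
        · apply (ih hdsorted).mpr
          refine ⟨(hmem_ne k hka).mp h, ?_⟩
          have hcc : (a :: t).count k = t.count k := by
            simp [Ne.symm hka]
          rw [hcc, hcount_ne k hka] at hc
          exact hc

-- keys of runsB of a sorted list are Nodup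
theorem runsB_keys_nodup (s : List Int) (hs : s.Pairwise (· ≤ ·)) :
    ((runsB s).map (·.1)).Nodup := by
  induction s using runsB.induct with
  | case1 => simp [runsB]
  | case2 a t ih =>
    have ht : t.Pairwise (· ≤ ·) := (List.pairwise_cons.mp hs).2
    have hge : ∀ x ∈ t, a ≤ x := (List.pairwise_cons.mp hs).1
    have hdsorted : (t.dropWhile (fun x => x == a)).Pairwise (· ≤ ·) :=
      ht.sublist (List.dropWhile_sublist _)
    rw [runsB]
    simp only [List.map_cons, List.nodup_cons]
    refine ⟨?_, ih hdsorted⟩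
    intro hmem
    rcases List.mem_map.mp hmem with ⟨⟨k, c⟩, hp, hk⟩
    have := (runsB_mem _ hdsorted k c).mp hp
    exact not_mem_dropWhile_sorted a t ht hge (hk ▸ this.1)

-- max? with identity key is permutation-invariant
theorem max?_id_perm {xs ys : List Int} (h : xs.Perm ys) :
    PySem.List.max? xs (fun v => v) = PySem.List.max? ys (fun v => v) := by
  cases hx : PySem.List.max? xs (fun v => v) with
  | none =>
    have : xs = [] := (PySem.List.max?_eq_none_iff _ _).mp hx
    subst this
    rw [(PySem.List.max?_eq_none_iff _ _).mpr (h.nil_eq.symm ▸ rfl)]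
  | some m =>
    cases hy : PySem.List.max? ys (fun v => v) with
    | none =>
      have : ys = [] := (PySem.List.max?_eq_none_iff _ _).mp hy
      subst this
      exact absurd (h.mem_iff.mp (PySem.List.max?_mem hx)) (by simp)
    | some m' =>
      have h1 : m ≤ m' := PySem.List.max?_isMax hy m (h.mem_iff.mp (PySem.List.max?_mem hx))
      have h2 : m' ≤ m := PySem.List.max?_isMax hx m' (h.mem_iff.mpr (PySem.List.max?_mem hy))
      rw [le_antisymm h1 h2]

-- A's item loop after the first match: any further match returns -1
theorem loopA1 (mxcnt : Int) (items : List (Int × Int)) (mx : Int) :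
    solutionLoopA mxcnt items mx 1
      = if items.filter (fun p => p.2 == mxcnt) = [] then mx else -1 := by
  induction items generalizing mx with
  | nil => simp [solutionLoopA]
  | cons p rest ih =>
    obtain ⟨k, v⟩ := p
    by_cases hv : v = mxcnt
    · simp [solutionLoopA, hv]
    · have hv' : (v == mxcnt) = false := by simpa using hv
      have hf : List.filter (fun p => p.2 == mxcnt) ((k, v) :: rest)
          = List.filter (fun p => p.2 == mxcnt) rest := by
        rw [List.filter_cons]; simp [hv']
      rw [hf]
      simp only [solutionLoopA, hv', Bool.false_eq_true, if_false]
      exact ih mx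

-- A's item loop from the start, characterised by the filtered matches
theorem loopA0 (mxcnt : Int) (items : List (Int × Int)) (mx0 : Int) :
    solutionLoopA mxcnt items mx0 0
      = match items.filter (fun p => p.2 == mxcnt) with
        | [] => mx0
        | [(k, _)] => k
        | _ => -1 := by
  induction items generalizing mx0 with
  | nil => simp [solutionLoopA]
  | cons p rest ih =>
    obtain ⟨k, v⟩ := p
    by_cases hv : v = mxcnt
    · have hv' : (v == mxcnt) = true := by simpa using hv
      simp only [solutionLoopA, hv', if_true, List.filter_cons]
      have h01 : ¬((0 : Int) + 1 > 1) := by norm_num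
      rw [if_neg h01, show (0 : Int) + 1 = 1 from by norm_num, loopA1]
      cases hf : rest.filter (fun p => p.2 == mxcnt) with
      | nil => simp
      | cons q qs => simp
    · have hv' : (v == mxcnt) = false := by simpa using hv
      simp only [solutionLoopA, hv', List.filter_cons, Bool.false_eq_true, if_false]
      exact ih mx0

-- ===== VERDICT (by name: the statement is the Claim_ definition above) =====
theorem solution_spec : Claim_equal_solution := by
  intro arr _hdom hpre
  unfold Spec_solution solution solution_alt
  have hssort : (PySem.List.sorted arr (fun x => x) false).Pairwise (· ≤ ·) := by
    simpa using PySem.List.sorted_pairwise arr (fun x => x)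
  have hperm0 : (PySem.List.sorted arr (fun x => x) false).Perm arr :=
    PySem.List.sorted_perm arr (fun x => x) false
  set s := PySem.List.sorted arr (fun x => x) false with hs
  set groups := runsB s with hgroups
  set itemsA := (PySem.Set.ofList arr).map (fun k => (k, (arr.count k : Int))) with hitemsA
  -- itemsA and groups are permutations of each other
  have hnodupA : itemsA.Nodup := by
    apply (PySem.Set.nodup_ofList arr).map
    intro x y hxy
    simpa using congrArg Prod.fst hxy
  have hnodupB : groups.Nodup := List.Nodup.of_map _ (runsB_keys_nodup s hssort)
  have hmemA : ∀ k c : Int, (k, c) ∈ itemsA ↔ k ∈ arr ∧ c = (arr.count k : Int) := by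
    intro k c
    rw [hitemsA]
    constructor
    · intro h
      rcases List.mem_map.mp h with ⟨k', hk', heq⟩
      obtain ⟨h1, h2⟩ := Prod.mk.inj heq
      subst h1
      exact ⟨(PySem.Set.mem_ofList arr k').mp hk', h2.symm⟩
    · rintro ⟨h1, h2⟩
      exact List.mem_map.mpr ⟨k, (PySem.Set.mem_ofList arr k).mpr h1, by rw [h2]⟩
  have hmemB : ∀ k c : Int, (k, c) ∈ groups ↔ k ∈ arr ∧ c = (arr.count k : Int) := by
    intro k c
    rw [hgroups, runsB_mem s hssort k c, hperm0.mem_iff, hperm0.count_eq]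
  have hperm : itemsA.Perm groups := by
    rw [List.perm_ext_iff_of_nodup hnodupA hnodupB]
    rintro ⟨k, c⟩
    rw [hmemA, hmemB]
  -- the dict built by A has items = itemsA
  have hdic : (arr.foldl (fun d a => d.modify a 0 (fun x => x + 1)) PySem.Dict.empty).items
      = itemsA := itemsA_char arr
  simp only [PySem.Dict.values, hdic]
  -- the two maxima agree
  have hvalperm : (itemsA.map (·.2)).Perm (groups.map (·.2)) := hperm.map _
  rw [max?_id_perm hvalperm]
  -- both lists are nonempty, so the max exists
  have hsne : s ≠ [] := by
    rw [hs]
    simpa [PySem.List.sorted_eq_nil_iff] using hpre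
  have hgne : groups ≠ [] := by
    rw [hgroups]
    cases hcase : s with
    | nil => exact absurd hcase hsne
    | cons a t => rw [runsB]; exact List.cons_ne_nil _ _
  cases hmax : PySem.List.max? (groups.map (·.2)) (fun c => c) with
  | none =>
    exact absurd ((PySem.List.max?_eq_none_iff _ _).mp hmax) (by simpa using hgne)
  | some mx =>
    dsimp only
    -- the filtered match lists are permutations, and nonempty
    have hfperm : (itemsA.filter (fun p => p.2 == mx)).Perm
        (groups.filter (fun p => p.2 == mx)) := hperm.filter _
    have hmxmem : mx ∈ groups.map (·.2) := PySem.List.max?_mem hmax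
    have hfBne : groups.filter (fun p => p.2 == mx) ≠ [] := by
      rcases List.mem_map.mp hmxmem with ⟨p, hp, hpe⟩
      intro hnil
      have : p ∈ groups.filter (fun p => p.2 == mx) :=
        List.mem_filter.mpr ⟨hp, by simp [hpe]⟩
      rw [hnil] at this
      simp at this
    rw [loopA0]
    cases hfA : itemsA.filter (fun p => p.2 == mx) with
    | nil =>
      exact absurd (hfA ▸ hfperm).nil_eq.symm hfBne
    | cons p ps =>
      cases ps with
      | nil =>
        -- unique mode: the singleton filters coincide
        have hfB : groups.filter (fun p => p.2 == mx) = [p] :=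
          List.perm_singleton.mp (hfA ▸ hfperm).symm
        obtain ⟨k, v⟩ := p
        simp [hfB]
      | cons q qs =>
        -- tie: at least two modes on both sides
        have hlen : (groups.filter (fun p => p.2 == mx)).length = qs.length + 2 := by
          have := (hfA ▸ hfperm).length_eq
          simpa using this.symm
        have : ((groups.filter (fun p => p.2 == mx)).map (·.1)).length ≠ 1 := by
          simp [hlen]
        simp only [beq_iff_eq]
        rw [if_neg (by simpa using this)]
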